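-- pv_equiv track=rewrite | github.com/denissgrabovskis/DIP225.23-projekts | src/helper.py | get_last_date
-- ===== SOURCE A (Python) =====
-- def get_last_date(clocks):
--     last_line_with_date = len(clocks)-1 # sākt ar pedejo rindu
--
--     while clocks and last_line_with_date >= 0:
--         clock_line = clocks[last_line_with_date]
--         if ('/' in clock_line): # '/' būs tikai ja ir datums ([dd/mm/yyyy]  hh:mm   hh:mm)
--             return clock_line.strip().split('\t')[0] # atgriež tikai datumu
--         else:
--             last_line_with_date -= 1
--
--     return ""
-- ===== SOURCE B (Python) =====
-- def get_last_date(clocks):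
--     candidates = [line for line in clocks if '/' in line]
--     if candidates:
--         return candidates[-1].strip().split('\t')[0]
--     return ""
-- ===== Notes on version B (the rewrite author's own statement) =====
-- stated objective: simpler
-- what changed: Replaces the index-based backward while-loop with early return by a forward filter of the '/'-containing lines followed by taking the last candidate.
import Mathlib
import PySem

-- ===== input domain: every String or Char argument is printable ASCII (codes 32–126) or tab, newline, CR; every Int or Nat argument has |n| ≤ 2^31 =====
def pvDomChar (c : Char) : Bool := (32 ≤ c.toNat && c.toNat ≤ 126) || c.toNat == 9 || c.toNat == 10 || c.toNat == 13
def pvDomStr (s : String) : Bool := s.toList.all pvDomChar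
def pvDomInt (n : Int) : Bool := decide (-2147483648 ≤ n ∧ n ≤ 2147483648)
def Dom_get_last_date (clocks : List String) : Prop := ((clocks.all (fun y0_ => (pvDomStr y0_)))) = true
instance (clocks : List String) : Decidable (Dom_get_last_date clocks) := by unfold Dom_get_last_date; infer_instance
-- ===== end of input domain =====

-- B replaces A's backward index scan with a forward filter + last element; objective: simpler.

-- ===== PORT A =====
-- date extraction shared by both Pythons verbatim: line.strip().split('\t')[0]
-- ([0] of a split result always exists, so headD's default is unreachable)
def pvExtractDate (line : String) : String :=
  (((PySem.Str.split? (PySem.Str.strip line) "\t").getD []).headD "")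

-- the while loop: argument i+1 means Python's last_line_with_date = i; 0 means the loop exited
-- (the index is always in range there, so List.getD is exact for clocks[last_line_with_date])
def getLastDateGo (clocks : List String) : Nat → String
  | 0 => ""
  | i + 1 =>
    let clock_line := clocks.getD i ""
    if PySem.Str.isIn "/" clock_line then pvExtractDate clock_line
    else getLastDateGo clocks i

def get_last_date (clocks : List String) : String :=
  getLastDateGo clocks clocks.length

-- ===== PORT B =====
def get_last_date_alt (clocks : List String) : String :=
  let candidates := clocks.filter (fun line => PySem.Str.isIn "/" line)
  match candidates.getLast? with
  | some line => pvExtractDate line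
  | none => ""

-- ===== PRECONDITION & SPEC =====
def Spec_get_last_date (clocks : List String) (out : String) : Prop := out = get_last_date_alt clocks
instance (clocks : List String) (out : String) : Decidable (Spec_get_last_date clocks out) := by unfold Spec_get_last_date; infer_instance

-- ===== CLAIM (what is proved, stated in full; the proofs are below) =====
def Claim_equal_get_last_date : Prop := ∀ (clocks : List String), Dom_get_last_date clocks → Spec_get_last_date clocks (get_last_date clocks)

-- ===== LEMMAS AND PROOFS =====

theorem pvGetD_append_lt (xs : List String) (x : String) (j : Nat) (h : j < xs.length) :
    (xs ++ [x]).getD j "" = xs.getD j "" := by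
  simp [List.getD_eq_getElem?_getD, List.getElem?_append_left h]

theorem pvGetD_append_last (xs : List String) (x : String) :
    (xs ++ [x]).getD xs.length "" = x := by
  simp [List.getD_eq_getElem?_getD]

-- appending an element does not change the loop's behaviour for indices inside the prefix
theorem getLastDateGo_append (xs : List String) (x : String) :
    ∀ i, i ≤ xs.length → getLastDateGo (xs ++ [x]) i = getLastDateGo xs i := by
  intro i
  induction i with
  | zero => intro _; rfl
  | succ j ih =>
    intro hj
    simp only [getLastDateGo]
    rw [pvGetD_append_lt xs x j (by omega)]
    split_ifs with h
    · rfl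
    · exact ih (by omega)

theorem get_last_date_eq_alt (clocks : List String) :
    get_last_date clocks = get_last_date_alt clocks := by
  induction clocks using List.reverseRecOn with
  | nil => rfl
  | append_singleton xs x ih =>
    unfold get_last_date get_last_date_alt
    simp only [List.length_append, List.length_singleton, List.filter_append, List.filter_cons,
      List.filter_nil, getLastDateGo, pvGetD_append_last]
    by_cases h : PySem.Chars.isIn ['/'] x.toList = true
    · simp [h]
    · simp [h]
      rw [getLastDateGo_append xs x xs.length (le_refl _)]
      unfold get_last_date get_last_date_alt at ih
      simpa using ih

-- ===== VERDICT (by name: the statement is the Claim_ definition above) =====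
theorem get_last_date_spec : Claim_equal_get_last_date := by
  intro clocks _
  exact get_last_date_eq_alt clocks
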